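-- pv_equiv track=rewrite | github.com/0xDQ3/FirmUDS | FirmUDS.py | filter_and_group_leaf_nodes
-- ===== SOURCE A (Python) =====
-- def filter_and_group_leaf_nodes(leaf_nodes):
--     # Categorize: variables starting with DAT_ and functions starting with FUN_
--     dat_nodes = sorted([node for node in leaf_nodes if node.startswith("DAT_")], key=lambda x: int(x.split("_")[1], 16))
--     fun_nodes = [node for node in leaf_nodes if node.startswith("FUN_")]
--
--     # Store the final result
--     result = []
--
--     # Handle DAT_ variables
--     if dat_nodes:
--         groups = []
--         current_group = [dat_nodes[0]]
--
--         for i in range(1, len(dat_nodes)):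
--             # Extract the numeric part and check if consecutive
--             current_value = int(dat_nodes[i].split("_")[1], 16)
--             previous_value = int(dat_nodes[i - 1].split("_")[1], 16)
--
--             if current_value == previous_value + 1:
--                 current_group.append(dat_nodes[i])
--             else:
--                 groups.append(current_group)
--                 current_group = [dat_nodes[i]]
--
--         # Add the last group
--         groups.append(current_group)
--
--         # Merge consecutive groups into arrays, keep non-consecutive ones separate
--         for group in groups:
--             if len(group) > 1:
--                 # Merge into an array
--                 base_name = min(group)
--                 result.append(f"{base_name}[]")
--             else:
--                 # Keep separate
--                 result.extend(group)
--
--     # Add FUN_ functions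
--     result.extend(fun_nodes)
--
--     return result
-- ===== SOURCE B (Python) =====
-- def filter_and_group_leaf_nodes(leaf_nodes):
--     # One pass over a (value - index, name) keyed list: equal keys mark a run of
--     # consecutive hex values, so runs are split and emitted directly, with no
--     # adjacent re-parsing and no intermediate list of groups.
--     dats = sorted([n for n in leaf_nodes if n.startswith("DAT_")],
--                   key=lambda x: int(x.split("_")[1], 16))
--     keyed = [(int(n.split("_")[1], 16) - i, n) for i, n in enumerate(dats)]
--     out = []
--     while keyed:
--         k, first = keyed[0]
--         run = [first]
--         keyed = keyed[1:]
--         while keyed and keyed[0][0] == k: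
--             run.append(keyed[0][1])
--             keyed = keyed[1:]
--         out.extend(run if len(run) == 1 else [min(run) + "[]"])
--     out += [n for n in leaf_nodes if n.startswith("FUN_")]
--     return out
-- ===== Notes on version B (the rewrite author's own statement) =====
-- stated objective: alternative
-- what changed: B replaces A's two-phase grouping (re-parsing adjacent hex values to build a list of groups, then a second emission pass) by a single pass over a precomputed (value - index, name) keyed list whose equal-key runs are exactly the consecutive groups, emitting each run's result directly.
import Mathlib
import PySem

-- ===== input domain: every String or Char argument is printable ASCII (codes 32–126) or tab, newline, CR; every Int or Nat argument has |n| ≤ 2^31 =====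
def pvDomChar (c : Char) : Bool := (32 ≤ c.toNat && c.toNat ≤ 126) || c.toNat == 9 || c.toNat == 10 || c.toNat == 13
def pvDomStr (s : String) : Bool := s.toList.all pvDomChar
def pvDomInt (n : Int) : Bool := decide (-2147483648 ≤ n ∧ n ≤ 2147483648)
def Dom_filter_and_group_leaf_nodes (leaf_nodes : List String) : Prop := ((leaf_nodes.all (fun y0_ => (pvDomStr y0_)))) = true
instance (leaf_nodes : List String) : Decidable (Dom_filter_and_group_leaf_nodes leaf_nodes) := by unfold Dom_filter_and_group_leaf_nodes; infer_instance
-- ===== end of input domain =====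

-- B replaces A's two-phase grouping (pairwise hex re-parsing building a list of groups,
-- then a second emission pass) by a single pass over a (value − index, name) keyed list
-- whose equal-key runs are exactly the consecutive groups; objective: alternative.

-- int(x.split("_")[1], 16) — shared by both Pythons verbatim (the sort key of A and B).
def datKey (x : String) : Int :=
  (PySem.Int.ofStrBase? ((PySem.List.pyGet? ((PySem.Str.split? x "_").getD []) 1).getD "") 16).getD 0

-- ===== PORT A =====
-- A's for-loop over range(1, len(dat_nodes)) carrying (groups, current_group); the
-- previous element dat_nodes[i-1] is carried as `prev`.
def aLoop (groups : List (List String)) (cur : List String) (prev : String) :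
    List String → List (List String) × List String
  | [] => (groups, cur)
  | x :: xs =>
    if datKey x == datKey prev + 1 then aLoop groups (cur ++ [x]) x xs
    else aLoop (groups ++ [cur]) [x] x xs

def filter_and_group_leaf_nodes (leaf_nodes : List String) : List String :=
  let dat_nodes := PySem.List.sorted (leaf_nodes.filter (fun n => PySem.Str.startswith n "DAT_")) datKey
  let fun_nodes := leaf_nodes.filter (fun n => PySem.Str.startswith n "FUN_")
  let result : List String :=
    match dat_nodes with
    | [] => []
    | d0 :: rest =>
      let p := aLoop [] [d0] d0 rest
      let groups := p.1 ++ [p.2]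
      groups.foldl (fun res g =>
        if 1 < g.length then res ++ [((PySem.List.min? g (fun y => y)).getD "") ++ "[]"]
        else res ++ g) []
  result ++ fun_nodes

-- ===== PORT B =====
-- the inner `while keyed and keyed[0][0] == k` of Source B
def bInner (k : Int) (run : List String) : List (Int × String) → List String × List (Int × String)
  | [] => (run, [])
  | (k', name) :: rest =>
    if k' == k then bInner k (run ++ [name]) rest else (run, (k', name) :: rest)

theorem bInner_snd_le (k : Int) (run : List String) (keyed : List (Int × String)) :
    (bInner k run keyed).2.length ≤ keyed.length := by
  induction keyed generalizing run with
  | nil => simp [bInner]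
  | cons p rest ih =>
    obtain ⟨k', name⟩ := p
    by_cases h : k' == k <;> simp [bInner, h]
    · exact le_trans (ih _) (Nat.le_succ _)

-- the outer `while keyed` of Source B
def bLoop (keyed : List (Int × String)) (out : List String) : List String :=
  match keyed with
  | [] => out
  | (k, first) :: rest =>
    let p := bInner k [first] rest
    bLoop p.2 (out ++ (if p.1.length == 1 then p.1
                       else [((PySem.List.min? p.1 (fun y => y)).getD "") ++ "[]"]))
termination_by keyed.length
decreasing_by exact Nat.lt_succ_of_le (bInner_snd_le _ _ _)

def filter_and_group_leaf_nodes_alt (leaf_nodes : List String) : List String :=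
  let dats := PySem.List.sorted (leaf_nodes.filter (fun n => PySem.Str.startswith n "DAT_")) datKey
  let keyed := (PySem.List.enumerate dats).map (fun p => (datKey p.2 - p.1, p.2))
  bLoop keyed [] ++ leaf_nodes.filter (fun n => PySem.Str.startswith n "FUN_")

-- ===== PRECONDITION & SPEC =====
-- Pre_ excludes exactly the inputs on which A raises ValueError: a node starting with
-- "DAT_" whose part after the first underscore is not a valid base-16 integer literal.
def Pre_filter_and_group_leaf_nodes (leaf_nodes : List String) : Prop :=
  ∀ n ∈ leaf_nodes, PySem.Str.startswith n "DAT_" = true →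
    (PySem.Int.ofStrBase? ((PySem.List.pyGet? ((PySem.Str.split? n "_").getD []) 1).getD "") 16).isSome = true
instance (leaf_nodes : List String) : Decidable (Pre_filter_and_group_leaf_nodes leaf_nodes) := by
  unfold Pre_filter_and_group_leaf_nodes; infer_instance

def pvWitness_filter_and_group_leaf_nodes : List String :=
  ["DAT_0001", "FUN_0abc", "DAT_0002", "DAT_0009", "xyz"]

def Spec_filter_and_group_leaf_nodes (leaf_nodes : List String) (out : List String) : Prop :=
  out = filter_and_group_leaf_nodes_alt leaf_nodes
instance (leaf_nodes : List String) (out : List String) : Decidable (Spec_filter_and_group_leaf_nodes leaf_nodes out) := by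
  unfold Spec_filter_and_group_leaf_nodes; infer_instance

-- ===== CLAIM (what is proved, stated in full; the proofs are below) =====
def Claim_equal_filter_and_group_leaf_nodes : Prop :=
  ∀ (leaf_nodes : List String), Dom_filter_and_group_leaf_nodes leaf_nodes →
    Pre_filter_and_group_leaf_nodes leaf_nodes →
    Spec_filter_and_group_leaf_nodes leaf_nodes (filter_and_group_leaf_nodes leaf_nodes)

-- ===== LEMMAS AND PROOFS =====

-- the emission step shared by both programs, written on one group
def emitG (g : List String) : List String :=
  if 1 < g.length then [((PySem.List.min? g (fun y => y)).getD "") ++ "[]"] else g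

-- the keyed list of Source B, as a recursion indexed by the running offset
def keyedFrom (i : Int) : List String → List (Int × String)
  | [] => []
  | x :: xs => (datKey x - i, x) :: keyedFrom (i + 1) xs

theorem enumerate_map_eq_keyedFrom (dats : List String) (i : Int) :
    (PySem.List.enumerate dats i).map (fun p => (datKey p.2 - p.1, p.2)) = keyedFrom i dats := by
  induction dats generalizing i with
  | nil => simp [keyedFrom, PySem.List.enumerate_nil]
  | cons x xs ih => simp [keyedFrom, PySem.List.enumerate_cons, ih]

theorem aLoop_groups_append (rest : List String) (groups : List (List String))
    (cur : List String) (prev : String) :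
    aLoop groups cur prev rest =
      (groups ++ (aLoop [] cur prev rest).1, (aLoop [] cur prev rest).2) := by
  induction rest generalizing groups cur prev with
  | nil => simp [aLoop]
  | cons x xs ih =>
    by_cases h : datKey x == datKey prev + 1
    · simp only [aLoop, if_pos h]
      exact ih _ _ _
    · simp only [aLoop, if_neg h]
      rw [ih (groups ++ [cur]) [x] x, ih ([] ++ [cur]) [x] x]
      simp

theorem bInner_fst_prefix (k : Int) (keyed : List (Int × String)) (run : List String) :
    ∃ t, (bInner k run keyed).1 = run ++ t := by
  induction keyed generalizing run with
  | nil => exact ⟨[], by simp [bInner]⟩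
  | cons p rest ih =>
    obtain ⟨k', nm⟩ := p
    by_cases h : k' == k
    · obtain ⟨t, ht⟩ := ih (run ++ [nm])
      exact ⟨nm :: t, by simp [bInner, h, ht]⟩
    · exact ⟨[], by simp [bInner, h]⟩

theorem bLoop_out (keyed : List (Int × String)) (out : List String) :
    bLoop keyed out = out ++ bLoop keyed [] := by
  induction hl : keyed.length using Nat.strong_induction_on generalizing keyed out with
  | _ n ih =>
    match keyed with
    | [] => simp [bLoop]
    | (k, first) :: rest =>
      rw [bLoop, bLoop]
      have hlt : (bInner k [first] rest).2.length < n := by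
        have := bInner_snd_le k [first] rest
        simp only [List.length_cons] at hl
        omega
      rw [ih _ hlt _ _ rfl, ih _ hlt _ (([] : List String) ++ _) rfl]
      simp

theorem emitG_length_one (g : List String) (h : g ≠ []) :
    (if g.length == 1 then g
     else [((PySem.List.min? g (fun y => y)).getD "") ++ "[]"]) = emitG g := by
  unfold emitG
  rcases g with _ | ⟨a, _ | ⟨b, t⟩⟩ <;> simp_all

-- main invariant: A's mid-run state (prev, cur, remaining rest at offset i) matches
-- B's inner scan with base key datKey prev - (i - 1)
theorem main_inv (rest : List String) (i : Int) (prev : String) (cur : List String)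
    (hcur : cur ≠ []) :
    ((aLoop [] cur prev rest).1 ++ [(aLoop [] cur prev rest).2]).flatMap emitG =
      emitG (bInner (datKey prev - (i - 1)) cur (keyedFrom i rest)).1 ++
        bLoop (bInner (datKey prev - (i - 1)) cur (keyedFrom i rest)).2 [] := by
  induction rest generalizing i prev cur with
  | nil => simp [aLoop, keyedFrom, bInner, bLoop]
  | cons x xs ih =>
    by_cases h : datKey x == datKey prev + 1
    · have hx : datKey x = datKey prev + 1 := by simpa using h
      have hkey : (datKey x - i == datKey prev - (i - 1)) = true := by
        simp only [beq_iff_eq]; omega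
      simp only [aLoop, if_pos h, keyedFrom, bInner, if_pos hkey]
      have := ih (i + 1) x (cur ++ [x]) (by simp)
      rw [show datKey x - (i + 1 - 1) = datKey prev - (i - 1) by omega] at this
      exact this
    · have hkey : (datKey x - i == datKey prev - (i - 1)) = false := by
        simp only [beq_eq_false_iff_ne, ne_eq]
        intro hc
        exact h (by simp only [beq_iff_eq]; omega)
      simp only [aLoop, if_neg h, keyedFrom, bInner, hkey, Bool.false_eq_true, if_false]
      rw [aLoop_groups_append xs ([] ++ [cur]) [x] x]
      simp only [List.flatMap_append, List.flatMap_cons, List.flatMap_nil, List.append_nil,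
        List.nil_append]
      rw [bLoop]
      rw [bLoop_out, emitG_length_one _ (by
        obtain ⟨t, ht⟩ := bInner_fst_prefix (datKey x - i) (keyedFrom (i + 1) xs) [x]
        simp [ht])]
      have := ih (i + 1) x [x] (by simp)
      rw [show datKey x - (i + 1 - 1) = datKey x - i by omega] at this
      simp only [List.flatMap_append, List.flatMap_cons, List.flatMap_nil, List.append_nil,
        List.nil_append, List.append_assoc] at this ⊢
      rw [this]

-- ===== VERDICT (by name: the statement is the Claim_ definition above) =====
theorem emit_step_eq :
    (fun (res : List String) (g : List String) =>
        if 1 < g.length then res ++ [((PySem.List.min? g (fun y => y)).getD "") ++ "[]"]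
        else res ++ g) =
      fun res g => res ++ emitG g := by
  funext res g
  unfold emitG
  split_ifs <;> rfl

theorem filter_and_group_leaf_nodes_spec : Claim_equal_filter_and_group_leaf_nodes := by
  intro leaf_nodes _ _
  unfold Spec_filter_and_group_leaf_nodes filter_and_group_leaf_nodes
    filter_and_group_leaf_nodes_alt
  simp only [enumerate_map_eq_keyedFrom]
  cases hd : PySem.List.sorted (leaf_nodes.filter (fun n => PySem.Str.startswith n "DAT_")) datKey with
  | nil => simp [keyedFrom, bLoop]
  | cons d0 rest =>
    simp only [emit_step_eq, PySem.List.foldl_append_eq_flatMap, List.nil_append]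
    have hb : keyedFrom 0 (d0 :: rest) = (datKey d0, d0) :: keyedFrom 1 rest := by
      simp [keyedFrom]
    rw [hb, bLoop, bLoop_out,
      emitG_length_one _ (by
        obtain ⟨t, ht⟩ := bInner_fst_prefix (datKey d0) (keyedFrom 1 rest) [d0]
        simp [ht])]
    have := main_inv rest 1 d0 [d0] (by simp)
    rw [show datKey d0 - (1 - 1) = datKey d0 by omega] at this
    rw [this]
    simp
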